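-- pv_equiv track=rewrite | github.com/leesihun/Github_downloader | run_ETX.py | _is_command_complete
-- ===== SOURCE A (Python) =====
-- def _is_command_complete(output: str) -> bool:
--     """Check if command has completed based on output patterns"""
--     completion_patterns = [
--         # Shell prompts
--         '$ ', '> ', '# ', '] ', ') ', '~]$ ', '~]# ',
--         # Job submission confirmations
--         'submitted', 'Submitted', 'SUBMITTED', 'Job ID', 'job id',
--         # Completion indicators
--         'Complete', 'COMPLETE', 'Done', 'DONE', 'Finished', 'FINISHED',
--         # Error indicators (also considered completion)
--         'Error', 'ERROR', 'Failed', 'FAILED'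
--     ]
--
--     recent_output = output[-200:] if len(output) > 200 else output
--     return any(pattern in recent_output for pattern in completion_patterns)
-- ===== SOURCE B (Python) =====
-- # Dispatch-table scan: '~]$ '/'~]# ' are dropped as redundant (they contain '$ '/'# '),
-- # two-char prompt patterns become a "prompt char followed by space" check, and the word
-- # patterns are indexed by first character, so one sweep over the tail replaces the
-- # per-pattern substring searches.
-- _PROMPT_CHARS = frozenset('$>#])')
-- _WORD_TAILS = {
--     's': ('ubmitted',),
--     'S': ('ubmitted', 'UBMITTED'),
--     'J': ('ob ID',),
--     'j': ('ob id',),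
--     'C': ('omplete', 'OMPLETE'),
--     'D': ('one', 'ONE'),
--     'F': ('inished', 'INISHED', 'ailed', 'AILED'),
--     'E': ('rror', 'RROR'),
-- }
--
-- def _is_command_complete(output: str) -> bool:
--     """Check if command has completed based on output patterns"""
--     recent = output[-200:] if len(output) > 200 else output
--     n = len(recent)
--     for i, c in enumerate(recent):
--         if c in _PROMPT_CHARS:
--             if i + 1 < n and recent[i + 1] == ' ':
--                 return True
--         else:
--             for tail in _WORD_TAILS.get(c, ()):
--                 if recent.startswith(tail, i + 1):
--                     return True
--     return False
-- ===== Notes on version B (the rewrite author's own statement) =====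
-- stated objective: alternative
-- what changed: A runs one full substring search per pattern (21 searches) over the 200-char tail; B first removes the two redundant patterns ('~]$ ' and '~]# ' contain '$ ' and '# '), then makes a single sweep over the tail with a first-character dispatch table: a prompt-char-followed-by-space check replaces the five two-char patterns and the word patterns are only compared where their first character matches.
import Mathlib
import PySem

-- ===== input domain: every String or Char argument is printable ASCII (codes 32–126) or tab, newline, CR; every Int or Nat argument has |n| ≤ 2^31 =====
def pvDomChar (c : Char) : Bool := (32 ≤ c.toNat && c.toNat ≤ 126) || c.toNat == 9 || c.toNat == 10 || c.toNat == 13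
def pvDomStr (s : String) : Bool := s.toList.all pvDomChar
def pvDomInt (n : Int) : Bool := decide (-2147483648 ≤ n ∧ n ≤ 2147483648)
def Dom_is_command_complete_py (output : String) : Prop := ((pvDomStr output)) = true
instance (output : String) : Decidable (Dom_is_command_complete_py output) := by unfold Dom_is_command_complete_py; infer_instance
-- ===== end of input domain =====

-- B replaces A's per-pattern substring searches by a single sweep with a first-character
-- dispatch table, after dropping the two redundant patterns '~]$ ' and '~]# ' (they
-- contain '$ ' and '# '); alternative decomposition, not claimed faster.

-- ===== PORT A =====
-- the literal pattern list of A
def pvPatternsA : List (List Char) :=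
  [['$',' '], ['>',' '], ['#',' '], [']',' '], [')',' '], ['~',']','$',' '], ['~',']','#',' '],
   ['s','u','b','m','i','t','t','e','d'], ['S','u','b','m','i','t','t','e','d'], ['S','U','B','M','I','T','T','E','D'],
   ['J','o','b',' ','I','D'], ['j','o','b',' ','i','d'],
   ['C','o','m','p','l','e','t','e'], ['C','O','M','P','L','E','T','E'],
   ['D','o','n','e'], ['D','O','N','E'],
   ['F','i','n','i','s','h','e','d'], ['F','I','N','I','S','H','E','D'],
   ['E','r','r','o','r'], ['E','R','R','O','R'],
   ['F','a','i','l','e','d'], ['F','A','I','L','E','D']]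

-- recent_output = output[-200:] if len(output) > 200 else output
-- return any(pattern in recent_output for pattern in completion_patterns)
def is_command_complete_py (output : String) : Bool :=
  let cs := output.toList
  let recent := if cs.length > 200 then PySem.List.slice cs (some (-200)) none else cs
  pvPatternsA.any (fun p => PySem.Chars.isIn p recent)

-- ===== PORT B =====
-- c in _PROMPT_CHARS
def pvPrompt (c : Char) : Bool := c == '$' || c == '>' || c == '#' || c == ']' || c == ')'

-- _WORD_TAILS.get(c, ())
def pvWordTails (c : Char) : List (List Char) :=
  if c == 's' then [['u','b','m','i','t','t','e','d']]
  else if c == 'S' then [['u','b','m','i','t','t','e','d'], ['U','B','M','I','T','T','E','D']]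
  else if c == 'J' then [['o','b',' ','I','D']]
  else if c == 'j' then [['o','b',' ','i','d']]
  else if c == 'C' then [['o','m','p','l','e','t','e'], ['O','M','P','L','E','T','E']]
  else if c == 'D' then [['o','n','e'], ['O','N','E']]
  else if c == 'F' then [['i','n','i','s','h','e','d'], ['I','N','I','S','H','E','D'], ['a','i','l','e','d'], ['A','I','L','E','D']]
  else if c == 'E' then [['r','r','o','r'], ['R','R','O','R']]
  else []

-- the enumerate loop: at the character c (position i) either the prompt-then-space check
-- fires, or some dispatched word tail starts right after c (recent.startswith(tail, i+1))
def pvScan : List Char → Bool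
  | [] => false
  | c :: rest =>
      (if pvPrompt c then
         match rest with
         | r :: _ => r == ' '
         | [] => false
       else (pvWordTails c).any (fun t => PySem.Chars.startswith rest t))
      || pvScan rest

def is_command_complete_py_alt (output : String) : Bool :=
  let cs := output.toList
  let recent := if cs.length > 200 then PySem.List.slice cs (some (-200)) none else cs
  pvScan recent

-- ===== PRECONDITION & SPEC =====
def Spec_is_command_complete_py (output : String) (out : Bool) : Prop := out = is_command_complete_py_alt output
instance (output : String) (out : Bool) : Decidable (Spec_is_command_complete_py output out) := by unfold Spec_is_command_complete_py; infer_instance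

-- ===== CLAIM (what is proved, stated in full; the proofs are below) =====
def Claim_equal_is_command_complete_py : Prop := ∀ (output : String), Dom_is_command_complete_py output → Spec_is_command_complete_py output (is_command_complete_py output)

-- ===== LEMMAS AND PROOFS =====

theorem pv_isIn_cons (p : List Char) (c : Char) (rest : List Char) :
    PySem.Chars.isIn p (c :: rest) = (PySem.Chars.startswith (c :: rest) p || PySem.Chars.isIn p rest) := by
  rw [Bool.eq_iff_iff]
  simp [PySem.Chars.isIn_iff_infix, PySem.Chars.startswith_iff, List.infix_cons_iff]

-- a '~]$ ' / '~]# ' match starting here leaves a '$ ' / '# ' match strictly inside rest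
theorem pv_absorb_dollar (rest : List Char) (h : [']','$',' '] <+: rest) :
    pvPatternsA.any (fun p => PySem.Chars.isIn p rest) = true := by
  obtain ⟨t, rfl⟩ := h
  refine List.any_eq_true.mpr ⟨['$',' '], by simp [pvPatternsA], ?_⟩
  exact (PySem.Chars.isIn_iff_infix _ _).mpr ⟨[']'], t, by simp⟩

theorem pv_absorb_hash (rest : List Char) (h : [']','#',' '] <+: rest) :
    pvPatternsA.any (fun p => PySem.Chars.isIn p rest) = true := by
  obtain ⟨t, rfl⟩ := h
  refine List.any_eq_true.mpr ⟨['#',' '], by simp [pvPatternsA], ?_⟩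
  exact (PySem.Chars.isIn_iff_infix _ _).mpr ⟨[']'], t, by simp⟩

theorem pv_head_step (c : Char) (rest : List Char) :
    (pvPatternsA.any (fun p => PySem.Chars.startswith (c :: rest) p)
      || pvPatternsA.any (fun p => PySem.Chars.isIn p rest))
    = ((if pvPrompt c then
         match rest with
         | r :: _ => r == ' '
         | [] => false
       else (pvWordTails c).any (fun t => PySem.Chars.startswith rest t))
      || pvPatternsA.any (fun p => PySem.Chars.isIn p rest)) := by
  rw [Bool.eq_iff_iff]
  by_cases hp : pvPrompt c = true
  · rw [if_pos hp]
    have hc := hp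
    simp only [pvPrompt, Bool.or_eq_true, beq_iff_eq] at hc
    rcases hc with ((((rfl | rfl) | rfl) | rfl) | rfl) <;>
    · cases rest with
      | nil => simp [pvPatternsA, PySem.Chars.startswith_iff]
      | cons r rs =>
          by_cases hr : r = ' '
          · subst hr
            simp [pvPatternsA, PySem.Chars.startswith_iff, List.cons_prefix_cons]
          · simp [pvPatternsA, PySem.Chars.startswith_iff, List.cons_prefix_cons, hr,
              Ne.symm hr]
  · rw [if_neg hp]
    simp only [pvPrompt, Bool.or_eq_true, beq_iff_eq, not_or] at hp
    obtain ⟨⟨⟨⟨hq1, hq2⟩, hq3⟩, hq4⟩, hq5⟩ := hp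
    unfold pvWordTails
    split_ifs with h1 h2 h3 h4 h5 h6 h7 h8
    · obtain rfl : c = 's' := by simpa using h1
      simp [pvPatternsA, PySem.Chars.startswith_iff, List.cons_prefix_cons]
    · obtain rfl : c = 'S' := by simpa using h2
      simp [pvPatternsA, PySem.Chars.startswith_iff, List.cons_prefix_cons]
    · obtain rfl : c = 'J' := by simpa using h3
      simp [pvPatternsA, PySem.Chars.startswith_iff, List.cons_prefix_cons]
    · obtain rfl : c = 'j' := by simpa using h4
      simp [pvPatternsA, PySem.Chars.startswith_iff, List.cons_prefix_cons]
    · obtain rfl : c = 'C' := by simpa using h5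
      simp [pvPatternsA, PySem.Chars.startswith_iff, List.cons_prefix_cons]
    · obtain rfl : c = 'D' := by simpa using h6
      simp [pvPatternsA, PySem.Chars.startswith_iff, List.cons_prefix_cons]
    · obtain rfl : c = 'F' := by simpa using h7
      simp [pvPatternsA, PySem.Chars.startswith_iff, List.cons_prefix_cons]
    · obtain rfl : c = 'E' := by simpa using h8
      simp [pvPatternsA, PySem.Chars.startswith_iff, List.cons_prefix_cons]
    · -- no word tail and no prompt char: only the redundant '~…' patterns could start here
      have hw1 : c ≠ 's' := by simpa using h1
      have hw2 : c ≠ 'S' := by simpa using h2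
      have hw3 : c ≠ 'J' := by simpa using h3
      have hw4 : c ≠ 'j' := by simpa using h4
      have hw5 : c ≠ 'C' := by simpa using h5
      have hw6 : c ≠ 'D' := by simpa using h6
      have hw7 : c ≠ 'F' := by simpa using h7
      have hw8 : c ≠ 'E' := by simpa using h8
      simp only [List.any_nil, Bool.false_or]
      constructor
      · intro h
        rw [Bool.or_eq_true] at h
        rcases h with hL | hX
        · obtain ⟨p, hpmem, hs⟩ := List.any_eq_true.mp hL
          rw [PySem.Chars.startswith_iff] at hs
          simp only [pvPatternsA, List.mem_cons, List.not_mem_nil, or_false] at hpmem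
          rcases hpmem with rfl|rfl|rfl|rfl|rfl|rfl|rfl|rfl|rfl|rfl|rfl|rfl|rfl|rfl|rfl|rfl|rfl|rfl|rfl|rfl|rfl|rfl <;>
            rw [List.cons_prefix_cons] at hs
          · exact absurd hs.1.symm hq1
          · exact absurd hs.1.symm hq2
          · exact absurd hs.1.symm hq3
          · exact absurd hs.1.symm hq4
          · exact absurd hs.1.symm hq5
          · exact pv_absorb_dollar rest hs.2
          · exact pv_absorb_hash rest hs.2
          · exact absurd hs.1.symm hw1
          · exact absurd hs.1.symm hw2
          · exact absurd hs.1.symm hw2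
          · exact absurd hs.1.symm hw3
          · exact absurd hs.1.symm hw4
          · exact absurd hs.1.symm hw5
          · exact absurd hs.1.symm hw5
          · exact absurd hs.1.symm hw6
          · exact absurd hs.1.symm hw6
          · exact absurd hs.1.symm hw7
          · exact absurd hs.1.symm hw7
          · exact absurd hs.1.symm hw8
          · exact absurd hs.1.symm hw8
          · exact absurd hs.1.symm hw7
          · exact absurd hs.1.symm hw7
        · exact hX
      · intro h
        rw [Bool.or_eq_true]
        exact Or.inr h

theorem pv_main (s : List Char) :
    pvPatternsA.any (fun p => PySem.Chars.isIn p s) = pvScan s := by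
  induction s with
  | nil => decide
  | cons c rest ih =>
      calc pvPatternsA.any (fun p => PySem.Chars.isIn p (c :: rest))
          = (pvPatternsA.any (fun p => PySem.Chars.startswith (c :: rest) p)
              || pvPatternsA.any (fun p => PySem.Chars.isIn p rest)) := by
            rw [Bool.eq_iff_iff]
            simp only [List.any_eq_true, pv_isIn_cons, Bool.or_eq_true]
            constructor
            · rintro ⟨x, hx, h | h⟩
              exacts [Or.inl ⟨x, hx, h⟩, Or.inr ⟨x, hx, h⟩]
            · rintro (⟨x, hx, h⟩ | ⟨x, hx, h⟩)
              exacts [⟨x, hx, Or.inl h⟩, ⟨x, hx, Or.inr h⟩]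
        _ = _ := by rw [pv_head_step, ih]; rfl

-- ===== VERDICT (by name: the statement is the Claim_ definition above) =====
theorem is_command_complete_py_spec : Claim_equal_is_command_complete_py := by
  intro output _
  unfold Spec_is_command_complete_py is_command_complete_py is_command_complete_py_alt
  exact pv_main _
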